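-- pv_equiv track=rewrite | github.com/funprograming007/funprograming | course_code/Q13_blackhole.py | convert
-- ===== SOURCE A (Python) =====
-- def convert(number):
--     digitals = list(map(int,str(number)))
--     digitals.sort(reverse=True)
--     maxnum = 0
--     for i in digitals:
--         maxnum=maxnum*10 + i
--
--     digitals.sort()
--     smallnum = 0
--     for i in digitals:
--         smallnum = smallnum*10 + i
--
--     return maxnum - smallnum
-- ===== SOURCE B (Python) =====
-- def convert(number):
--     digits = [int(c) for c in str(number)]
--     maxnum = 0
--     for v in range(9, -1, -1):
--         for _ in range(digits.count(v)):
--             maxnum = maxnum * 10 + v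
--     smallnum = 0
--     for v in range(10):
--         for _ in range(digits.count(v)):
--             smallnum = smallnum * 10 + v
--     return maxnum - smallnum
-- ===== Notes on version B (the rewrite author's own statement) =====
-- stated objective: alternative
-- what changed: B replaces A's two sorts of the digit list by a per-digit-value count (digits.count(v)) consumed once in descending and once in ascending value order, counting-sort style, so no sorted list is ever built.
import Mathlib
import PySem

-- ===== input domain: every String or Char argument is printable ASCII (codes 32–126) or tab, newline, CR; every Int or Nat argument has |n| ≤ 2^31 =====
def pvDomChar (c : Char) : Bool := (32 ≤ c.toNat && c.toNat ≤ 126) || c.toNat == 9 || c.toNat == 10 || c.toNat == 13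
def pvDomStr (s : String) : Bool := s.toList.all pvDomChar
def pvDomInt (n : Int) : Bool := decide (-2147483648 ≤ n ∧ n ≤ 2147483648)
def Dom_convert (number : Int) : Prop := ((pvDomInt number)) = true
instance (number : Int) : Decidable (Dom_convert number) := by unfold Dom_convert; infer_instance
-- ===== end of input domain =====

-- B replaces A's two sorts of the digit list by per-digit-value counts consumed in value
-- order (counting-sort style); objective: alternative algorithm, similar cost.

-- ===== PORT A =====
-- int(c) for a single char: none = ValueError (the '-' of a negative number);
-- the getD 0 default is unreachable under Pre_convert (number ≥ 0, so all chars are digits).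
def pyIntOfChar (c : Char) : Int := (PySem.Int.ofChars? [c]).getD 0

def convert (number : Int) : Int :=
  let digitals := (PySem.Int.toChars number).map pyIntOfChar
  let desc := PySem.List.sorted digitals (fun x => x) true
  let maxnum := desc.foldl (fun acc i => acc * 10 + i) 0
  let asc := PySem.List.sorted digitals (fun x => x) false
  let smallnum := asc.foldl (fun acc i => acc * 10 + i) 0
  maxnum - smallnum

-- ===== PORT B =====
def convert_alt (number : Int) : Int :=
  let digits := (PySem.Int.toChars number).map pyIntOfChar
  let maxnum := (PySem.List.pyRange 9 (-1) (-1)).foldl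
    (fun acc v => (PySem.List.pyRange 0 (PySem.List.count digits v : Int) 1).foldl
      (fun acc _ => acc * 10 + v) acc) 0
  let smallnum := (PySem.List.pyRange 0 10 1).foldl
    (fun acc v => (PySem.List.pyRange 0 (PySem.List.count digits v : Int) 1).foldl
      (fun acc _ => acc * 10 + v) acc) 0
  maxnum - smallnum

-- ===== PRECONDITION & SPEC =====
-- Pre_ excludes negative numbers: str(number) then contains '-', on which int()
-- raises ValueError in A (and in B alike).
def Pre_convert (number : Int) : Prop := 0 ≤ number
instance (number : Int) : Decidable (Pre_convert number) := by unfold Pre_convert; infer_instance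
def pvWitness_convert : Int := 2718
def Spec_convert (number : Int) (out : Int) : Prop := out = convert_alt number
instance (number : Int) (out : Int) : Decidable (Spec_convert number out) := by unfold Spec_convert; infer_instance

-- ===== CLAIM (what is proved, stated in full; the proofs are below) =====
def Claim_equal_convert : Prop := ∀ (number : Int), Dom_convert number → Pre_convert number → Spec_convert number (convert number)

-- ===== LEMMAS AND PROOFS =====

def digitChars : List Char := ['0','1','2','3','4','5','6','7','8','9']

def vsDesc : List Int := [9,8,7,6,5,4,3,2,1,0]
def vsAsc : List Int := [0,1,2,3,4,5,6,7,8,9]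

-- the digit list grouped by value: one constant block per value of vs
def blocks (vs L : List Int) : List Int := vs.flatMap (fun v => List.replicate (L.count v) v)

theorem toDigitsCore_digits (fuel n : Nat) (ds : List Char) (hds : ∀ c ∈ ds, c ∈ digitChars) :
    ∀ c ∈ Nat.toDigitsCore 10 fuel n ds, c ∈ digitChars := by
  induction fuel generalizing n ds with
  | zero => simpa [Nat.toDigitsCore] using hds
  | succ fuel ih =>
    intro c hc
    rw [Nat.toDigitsCore] at hc
    have hmod : n % 10 < 10 := Nat.mod_lt _ (by omega)
    have hd : (n % 10).digitChar ∈ digitChars := by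
      interval_cases h : n % 10 <;> decide
    split at hc
    · rcases List.mem_cons.mp hc with h | h
      · exact h ▸ hd
      · exact hds c h
    · refine ih _ ((n % 10).digitChar :: ds) ?_ c hc
      intro c' hc'
      rcases List.mem_cons.mp hc' with h | h
      · exact h ▸ hd
      · exact hds c' h

theorem count_blocks (vs L : List Int) (x : Int) (hnd : vs.Nodup) :
    (blocks vs L).count x = if x ∈ vs then L.count x else 0 := by
  induction vs with
  | nil => simp [blocks]
  | cons v vs ih =>
    rcases List.nodup_cons.mp hnd with ⟨hv, hnd'⟩
    simp only [blocks, List.flatMap_cons, List.count_append, List.count_replicate]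
    rw [show List.flatMap (fun v => List.replicate (List.count v L) v) vs = blocks vs L from rfl, ih hnd']
    by_cases hx : x = v
    · subst hx; simp [hv]
    · have hx' : ¬ v = x := fun h => hx h.symm
      simp [List.mem_cons, hx, hx']

theorem blocks_perm (vs L : List Int) (hnd : vs.Nodup) (hcov : ∀ x ∈ L, x ∈ vs) :
    (blocks vs L).Perm L := by
  rw [List.perm_iff_count]
  intro x
  rw [count_blocks vs L x hnd]
  by_cases hx : x ∈ vs
  · simp [hx]
  · simp [hx, List.count_eq_zero.mpr (fun h => hx (hcov x h))]

theorem blocks_pairwise_ge (vs L : List Int) (hp : vs.Pairwise (fun a b => b ≤ a)) :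
    (blocks vs L).Pairwise (fun a b => b ≤ a) := by
  rw [blocks, List.pairwise_flatMap]
  constructor
  · intro v _; exact List.pairwise_replicate.mpr (Or.inr le_rfl)
  · refine hp.imp_of_mem ?_
    intro a b ha hb hle x hx y hy
    rw [List.eq_of_mem_replicate hx, List.eq_of_mem_replicate hy]
    exact hle

theorem blocks_pairwise_le (vs L : List Int) (hp : vs.Pairwise (fun a b => a ≤ b)) :
    (blocks vs L).Pairwise (fun a b => a ≤ b) := by
  rw [blocks, List.pairwise_flatMap]
  constructor
  · intro v _; exact List.pairwise_replicate.mpr (Or.inr le_rfl)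
  · refine hp.imp_of_mem ?_
    intro a b ha hb hle x hx y hy
    rw [List.eq_of_mem_replicate hx, List.eq_of_mem_replicate hy]
    exact hle

theorem sorted_asc_eq (L : List Int) (hcov : ∀ x ∈ L, x ∈ vsAsc) :
    PySem.List.sorted L (fun x => x) false = blocks vsAsc L := by
  exact PySem.List.sorted_id_eq_of_perm_of_pairwise _ _
    (blocks_perm vsAsc L (by decide) hcov)
    (blocks_pairwise_le vsAsc L (by decide))

theorem sorted_desc_eq (L : List Int) (hcov : ∀ x ∈ L, x ∈ vsDesc) :
    PySem.List.sorted L (fun x => x) true = blocks vsDesc L := by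
  have h1 : (PySem.List.sorted L (fun x => x) true).reverse.Perm (blocks vsDesc L).reverse := by
    have := (PySem.List.sorted_perm L (fun x => x) true).trans (blocks_perm vsDesc L (by decide) hcov).symm
    exact ((List.reverse_perm _).trans this).trans (List.reverse_perm _).symm
  have h2 := List.pairwise_reverse.mpr (PySem.List.sorted_pairwise_rev L (fun x => x))
  have h3 := List.pairwise_reverse.mpr (blocks_pairwise_ge vsDesc L (by decide))
  have := PySem.List.eq_of_perm_of_pairwise_le_of_injective (l₁ := (PySem.List.sorted L (fun x => x) true).reverse)
    (l₂ := (blocks vsDesc L).reverse) (fun x => x) (fun a b h => h) h1 h2 h3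
  exact List.reverse_injective this

theorem foldl_ignore_iterate {α : Type} (g : Int → Int) :
    ∀ (l : List α) (a : Int), l.foldl (fun a _ => g a) a = g^[l.length] a := by
  intro l
  induction l with
  | nil => simp
  | cons x t ih => intro a; simp [List.foldl_cons, ih, Function.iterate_succ_apply]

theorem inner_eq (v : Int) (n : Nat) (acc : Int) :
    (PySem.List.pyRange 0 (n : Int) 1).foldl (fun acc _ => acc * 10 + v) acc
      = (List.replicate n v).foldl (fun acc i => acc * 10 + i) acc := by
  have hc : (List.replicate n v).foldl (fun acc i => acc * 10 + i) acc
      = (List.replicate n v).foldl (fun acc _ => acc * 10 + v) acc :=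
    by
      apply PySem.List.foldl_congr_mem
      intro a x hx
      rw [List.eq_of_mem_replicate hx]
  rw [hc, foldl_ignore_iterate, foldl_ignore_iterate, PySem.List.pyRange_zero_natCast]
  simp

theorem fold_blocks (vs L : List Int) :
    (blocks vs L).foldl (fun acc i => acc * 10 + i) 0
      = vs.foldl (fun acc v => (List.replicate (L.count v) v).foldl (fun acc i => acc * 10 + i) acc) 0 := by
  rw [blocks, List.foldl_flatMap]

theorem pyIntOfChar_mem (c : Char) (h : c ∈ digitChars) :
    pyIntOfChar c ∈ vsDesc ∧ pyIntOfChar c ∈ vsAsc := by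
  fin_cases h <;> decide

theorem convert_eq (number : Int) (h : 0 ≤ number) : convert number = convert_alt number := by
  have hchars : ∀ c ∈ PySem.Int.toChars number, c ∈ digitChars := by
    intro c hc
    rw [PySem.Int.toChars, if_neg (by omega)] at hc
    exact toDigitsCore_digits _ _ [] (by simp) c hc
  have hcovD : ∀ x ∈ (PySem.Int.toChars number).map pyIntOfChar, x ∈ vsDesc := by
    intro x hx
    obtain ⟨c, hc, rfl⟩ := List.mem_map.mp hx
    exact (pyIntOfChar_mem c (hchars c hc)).1
  have hcovA : ∀ x ∈ (PySem.Int.toChars number).map pyIntOfChar, x ∈ vsAsc := by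
    intro x hx
    obtain ⟨c, hc, rfl⟩ := List.mem_map.mp hx
    exact (pyIntOfChar_mem c (hchars c hc)).2
  have houter : ∀ (vs : List Int),
      vs.foldl (fun acc v => (List.replicate (((PySem.Int.toChars number).map pyIntOfChar).count v) v).foldl
        (fun acc i => acc * 10 + i) acc) 0
      = vs.foldl (fun acc v => (PySem.List.pyRange 0 (PySem.List.count ((PySem.Int.toChars number).map pyIntOfChar) v : Int) 1).foldl
        (fun acc _ => acc * 10 + v) acc) 0 := by
    intro vs
    apply PySem.List.foldl_congr_mem
    intro acc v _
    exact (inner_eq v (List.count v ((PySem.Int.toChars number).map pyIntOfChar)) acc).symm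
  simp only [convert, convert_alt]
  rw [sorted_desc_eq _ hcovD, sorted_asc_eq _ hcovA, fold_blocks, fold_blocks,
    show PySem.List.pyRange 9 (-1) (-1) = vsDesc from by decide,
    show PySem.List.pyRange 0 10 1 = vsAsc from by decide,
    houter vsDesc, houter vsAsc]

-- ===== VERDICT (by name: the statement is the Claim_ definition above) =====
theorem convert_spec : Claim_equal_convert := by
  intro number _ hpre
  unfold Spec_convert
  exact convert_eq number hpre
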